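-- pv_equiv track=rewrite | github.com/jozdashh/ada | hw03/set/set.py | solve
-- ===== SOURCE A (Python) =====
-- def solve(S, G, n):
--     A, B = [], []
--     for i in range(n):
--         if S[i] <= G[i]: A.append(i)
--         else: B.append(i)
--     A.sort(key = lambda x: S[x])
--     B.sort(key = lambda x: -G[x])
--     L, s, total = A + B, 0, 0
--     for i in range(n):
--         s += S[L[i]]
--         total = max(total, s)
--         total += G[L[i]]
--     return total
-- ===== SOURCE B (Python) =====
-- def _dc(P):
--     # (sum of S-parts, sum of G-parts, max over split points of prefixS + suffixG), P nonempty
--     if len(P) == 1: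
--         s, g = P[0]
--         return (s, g, s + g)
--     k = len(P) // 2
--     sX, gX, mX = _dc(P[:k])
--     sY, gY, mY = _dc(P[k:])
--     return (sX + sY, gX + gY, max(mX + gY, sX + mY))
--
-- def solve(S, G, n):
--     A = sorted((i for i in range(n) if S[i] <= G[i]), key=lambda i: S[i])
--     B = sorted((i for i in range(n) if S[i] > G[i]), key=lambda i: -G[i])
--     P = [(S[i], G[i]) for i in A + B]
--     if not P:
--         return 0
--     sS, sG, m = _dc(P)
--     return max(sG, m)
-- ===== Notes on version B (the rewrite author's own statement) =====
-- stated objective: alternative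
-- what changed: Keeps A's schedule order L but replaces the sequential interleaved max-plus scan by a divide-and-conquer: recursively split the (S,G) pair list in half, compute (sumS, sumG, best split value) for each half and merge with max(mX + gY, sX + mY); the answer is max(total G, merged best).
import Mathlib
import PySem

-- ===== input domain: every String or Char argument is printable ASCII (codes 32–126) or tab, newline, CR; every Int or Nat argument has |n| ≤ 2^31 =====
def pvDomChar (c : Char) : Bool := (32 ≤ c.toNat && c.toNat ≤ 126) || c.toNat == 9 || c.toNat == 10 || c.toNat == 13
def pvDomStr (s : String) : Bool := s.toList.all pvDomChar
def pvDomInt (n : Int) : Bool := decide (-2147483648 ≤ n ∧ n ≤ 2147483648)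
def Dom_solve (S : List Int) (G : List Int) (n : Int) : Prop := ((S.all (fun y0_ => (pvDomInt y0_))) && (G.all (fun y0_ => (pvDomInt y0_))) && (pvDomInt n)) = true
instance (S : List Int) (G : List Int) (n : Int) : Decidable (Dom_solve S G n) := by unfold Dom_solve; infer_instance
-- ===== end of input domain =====

-- B replaces A's sequential interleaved max-plus scan along the schedule order L by a
-- divide-and-conquer on the (S,G) pair list (split in half, merge (sumS, sumG, best)); objective: alternative.


-- ===== PORT A =====
def solve (S : List Int) (G : List Int) (n : Int) : Int :=
  -- A, B = [], []; for i in range(n): append i to A or B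
  let ab := (PySem.List.pyRange 0 n 1).foldl
      (fun (ab : List Int × List Int) i =>
        if PySem.List.pyGetD S i 0 ≤ PySem.List.pyGetD G i 0 then (ab.1 ++ [i], ab.2)
        else (ab.1, ab.2 ++ [i])) ([], [])
  -- A.sort(key=S[x]); B.sort(key=-G[x])
  let As := PySem.List.sorted ab.1 (fun x => PySem.List.pyGetD S x 0) false
  let Bs := PySem.List.sorted ab.2 (fun x => -(PySem.List.pyGetD G x 0)) false
  let L := As ++ Bs
  -- s, total = 0, 0; for i in range(n): s += S[L[i]]; total = max(total, s); total += G[L[i]]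
  let st := (PySem.List.pyRange 0 n 1).foldl
      (fun (st : Int × Int) i =>
        let j := PySem.List.pyGetD L i 0
        let s := st.1 + PySem.List.pyGetD S j 0
        (s, max st.2 s + PySem.List.pyGetD G j 0)) (0, 0)
  st.2

-- ===== PORT B =====
-- Source B's _dc: divide and conquer over a nonempty pair list; returns (sumS, sumG, best split value).
-- The fuel argument (list length) only makes the halving recursion structural; Source B needs none.
def pvDcN : Nat → List (Int × Int) → Int × Int × Int
  | _, [] => (0, 0, 0)                 -- Source B never calls _dc on []
  | _, [(s, g)] => (s, g, s + g)
  | Nat.succ f, P =>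
    let k := P.length / 2
    let rX := pvDcN f (P.take k)
    let rY := pvDcN f (P.drop k)
    (rX.1 + rY.1, rX.2.1 + rY.2.1, max (rX.2.2 + rY.2.1) (rX.1 + rY.2.2))
  | 0, _ => (0, 0, 0)                  -- unreachable: fuel = length

def pvDc (P : List (Int × Int)) : Int × Int × Int := pvDcN P.length P

def solve_alt (S : List Int) (G : List Int) (n : Int) : Int :=
  let A := PySem.List.sorted
      ((PySem.List.pyRange 0 n 1).filter (fun i => PySem.List.pyGetD S i 0 ≤ PySem.List.pyGetD G i 0))
      (fun i => PySem.List.pyGetD S i 0) false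
  let B := PySem.List.sorted
      ((PySem.List.pyRange 0 n 1).filter (fun i => PySem.List.pyGetD G i 0 < PySem.List.pyGetD S i 0))
      (fun i => -(PySem.List.pyGetD G i 0)) false
  let P := (A ++ B).map (fun i => (PySem.List.pyGetD S i 0, PySem.List.pyGetD G i 0))
  if P = [] then 0
  else
    let r := pvDc P
    max r.2.1 r.2.2

-- ===== PRECONDITION & SPEC =====
-- Pre_ excludes exactly the inputs on which A raises IndexError: 0 < n but n exceeds len(S) or len(G).
def Pre_solve (S : List Int) (G : List Int) (n : Int) : Prop :=
  n ≤ 0 ∨ (n ≤ S.length ∧ n ≤ G.length)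
instance (S : List Int) (G : List Int) (n : Int) : Decidable (Pre_solve S G n) := by
  unfold Pre_solve; infer_instance

def pvWitness_solve : List Int × List Int × Int := ([3, 1, 5], [2, 4, 5], 3)

def Spec_solve (S : List Int) (G : List Int) (n : Int) (out : Int) : Prop := out = solve_alt S G n
instance (S : List Int) (G : List Int) (n : Int) (out : Int) : Decidable (Spec_solve S G n out) := by unfold Spec_solve; infer_instance

-- ===== CLAIM (what is proved, stated in full; the proofs are below) =====
def Claim_equal_solve : Prop := ∀ (S : List Int) (G : List Int) (n : Int), Dom_solve S G n → Pre_solve S G n → Spec_solve S G n (solve S G n)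

-- ===== LEMMAS AND PROOFS =====

-- the schedule order both ports construct
def pvL (S : List Int) (G : List Int) (n : Int) : List Int :=
  PySem.List.sorted
      ((PySem.List.pyRange 0 n 1).filter
        (fun i => decide (PySem.List.pyGetD S i 0 ≤ PySem.List.pyGetD G i 0)))
      (fun i => PySem.List.pyGetD S i 0) false
  ++ PySem.List.sorted
      ((PySem.List.pyRange 0 n 1).filter
        (fun i => decide (PySem.List.pyGetD G i 0 < PySem.List.pyGetD S i 0)))
      (fun i => -(PySem.List.pyGetD G i 0)) false

theorem pvL_def (S : List Int) (G : List Int) (n : Int) : pvL S G n =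
  PySem.List.sorted
      ((PySem.List.pyRange 0 n 1).filter
        (fun i => decide (PySem.List.pyGetD S i 0 ≤ PySem.List.pyGetD G i 0)))
      (fun i => PySem.List.pyGetD S i 0) false
  ++ PySem.List.sorted
      ((PySem.List.pyRange 0 n 1).filter
        (fun i => decide (PySem.List.pyGetD G i 0 < PySem.List.pyGetD S i 0)))
      (fun i => -(PySem.List.pyGetD G i 0)) false := rfl

-- A's partition loop computes the two filters.
theorem pv_partition_SG (S G : List Int) (l : List Int) (a b : List Int) :
    l.foldl (fun (ab : List Int × List Int) i =>
      if PySem.List.pyGetD S i 0 ≤ PySem.List.pyGetD G i 0 then (ab.1 ++ [i], ab.2)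
      else (ab.1, ab.2 ++ [i])) (a, b)
    = (a ++ l.filter (fun i => decide (PySem.List.pyGetD S i 0 ≤ PySem.List.pyGetD G i 0)),
       b ++ l.filter (fun i => decide (PySem.List.pyGetD G i 0 < PySem.List.pyGetD S i 0))) := by
  induction l generalizing a b with
  | nil => simp
  | cons x xs ih =>
    by_cases h : PySem.List.pyGetD S x 0 ≤ PySem.List.pyGetD G x 0
    · simp only [List.foldl_cons, if_pos h, ih, List.filter_cons,
        decide_eq_true h, not_lt.mpr h]
      simp
    · simp only [List.foldl_cons, if_neg h, ih, List.filter_cons,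
        decide_eq_false h, not_le.mp h]
      simp

theorem pv_len (S G : List Int) (R : List Int) :
    (R.filter (fun i => decide (PySem.List.pyGetD S i 0 ≤ PySem.List.pyGetD G i 0))).length
      + (R.filter (fun i => decide (PySem.List.pyGetD G i 0 < PySem.List.pyGetD S i 0))).length
    = R.length := by
  induction R with
  | nil => simp
  | cons x xs ih =>
    by_cases h : PySem.List.pyGetD S x 0 ≤ PySem.List.pyGetD G x 0
    · simp only [List.filter_cons, decide_eq_true h, decide_eq_false (not_lt.mpr h)]
      simp only [List.length_cons, if_true, if_false, Bool.false_eq_true]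
      omega
    · simp only [List.filter_cons, decide_eq_false h, decide_eq_true (not_le.mp h)]
      simp only [List.length_cons, if_true, if_false, Bool.false_eq_true]
      omega

-- Abstract forms over pair lists ----------------------------------------------

def pvSumS (P : List (Int × Int)) : Int := (P.map Prod.fst).sum
def pvSumG (P : List (Int × Int)) : Int := (P.map Prod.snd).sum

-- candidate split-point values along P, starting at prefix sum s
def pvC (P : List (Int × Int)) (s : Int) : List Int :=
  match P with
  | [] => []
  | (a, g) :: t => (s + a + pvSumG ((a, g) :: t)) :: pvC t (s + a)

def pvMax : List Int → Int
  | [] => 0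
  | x :: t => t.foldl max x

theorem pvC_ne_nil (P : List (Int × Int)) (s : Int) (h : P ≠ []) : pvC P s ≠ [] := by
  cases P with
  | nil => exact absurd rfl h
  | cons p t => cases p; simp [pvC]

theorem pv_foldl_max_aux (l : List Int) : ∀ (b c : Int),
    l.foldl max (max b c) = max b (l.foldl max c) := by
  induction l with
  | nil => intro b c; rfl
  | cons y t ih =>
    intro b c
    simp only [List.foldl_cons, max_assoc, ih]

theorem pv_foldl_max (l : List Int) (b : Int) (h : l ≠ []) :
    l.foldl max b = max b (pvMax l) := by
  cases l with
  | nil => exact absurd rfl h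
  | cons x t =>
    simp only [pvMax, List.foldl_cons, pv_foldl_max_aux]

theorem pvMax_append (l1 l2 : List Int) (h1 : l1 ≠ []) (h2 : l2 ≠ []) :
    pvMax (l1 ++ l2) = max (pvMax l1) (pvMax l2) := by
  cases l1 with
  | nil => exact absurd rfl h1
  | cons x t =>
    simp only [pvMax, List.cons_append, List.foldl_append]
    rw [pv_foldl_max l2 _ h2]
    cases l2 with
    | nil => exact absurd rfl h2
    | cons y s => rfl

theorem pvMax_map_add (l : List Int) (c : Int) (h : l ≠ []) :
    pvMax (l.map (fun x => x + c)) = pvMax l + c := by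
  cases l with
  | nil => exact absurd rfl h
  | cons x t =>
    simp only [List.map_cons, pvMax]
    induction t generalizing x with
    | nil => simp
    | cons y t ih =>
      simp only [List.map_cons, List.foldl_cons]
      rw [max_add_add_right, ih (max x y) (by simp)]

theorem pvC_shift (P : List (Int × Int)) (s t : Int) :
    pvC P (s + t) = (pvC P t).map (fun x => x + s) := by
  induction P generalizing t with
  | nil => simp [pvC]
  | cons p tl ih =>
    cases p with
    | mk a g =>
      simp only [pvC, List.map_cons, List.cons.injEq]
      refine ⟨by omega, ?_⟩
      rw [show s + t + a = s + (t + a) from by omega, ih]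

theorem pvSumS_append (X Y : List (Int × Int)) : pvSumS (X ++ Y) = pvSumS X + pvSumS Y := by
  simp [pvSumS]
theorem pvSumG_append (X Y : List (Int × Int)) : pvSumG (X ++ Y) = pvSumG X + pvSumG Y := by
  simp [pvSumG]

theorem pvC_append (X Y : List (Int × Int)) (s : Int) :
    pvC (X ++ Y) s = (pvC X s).map (fun x => x + pvSumG Y) ++ pvC Y (s + pvSumS X) := by
  induction X generalizing s with
  | nil => simp [pvC, pvSumS]
  | cons p t ih =>
    cases p with
    | mk a g =>
      simp only [List.cons_append, pvC, List.map_cons, ih, List.cons.injEq]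
      refine ⟨by simp [pvSumG]; omega, ?_⟩
      have harg : s + pvSumS ((a, g) :: t) = s + a + pvSumS t := by
        simp only [pvSumS, List.map_cons, List.sum_cons]; omega
      rw [harg]

-- correctness of the divide-and-conquer merge
theorem pvDcN_step (f : Nat) (P : List (Int × Int)) (h2 : 2 ≤ P.length) :
    pvDcN (f + 1) P =
      (let k := P.length / 2
       let rX := pvDcN f (P.take k)
       let rY := pvDcN f (P.drop k)
       (rX.1 + rY.1, rX.2.1 + rY.2.1, max (rX.2.2 + rY.2.1) (rX.1 + rY.2.2))) := by
  match P, h2 with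
  | p :: q :: t, _ => rfl

theorem pvDcN_correct (f : Nat) : ∀ P : List (Int × Int), P.length ≤ f → P ≠ [] →
    pvDcN f P = (pvSumS P, pvSumG P, pvMax (pvC P 0)) := by
  induction f with
  | zero =>
    intro P hlen hne
    cases P with
    | nil => exact absurd rfl hne
    | cons p t => simp at hlen
  | succ f ih =>
    intro P hlen hne
    by_cases hle : P.length ≤ 1
    · match P, hne with
      | [(a, g)], _ => simp [pvDcN, pvSumS, pvSumG, pvC, pvMax]
      | p :: q :: t, _ => simp at hle
    · have hXlen : (P.take (P.length / 2)).length = P.length / 2 :=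
        List.length_take_of_le (by omega)
      have hXne : P.take (P.length / 2) ≠ [] := by
        intro hc; rw [hc] at hXlen; simp at hXlen; omega
      have hYne : P.drop (P.length / 2) ≠ [] := by
        intro hc; have := congrArg List.length hc
        simp [List.length_drop] at this; omega
      have hX := ih (P.take (P.length / 2)) (by rw [hXlen]; omega) hXne
      have hY := ih (P.drop (P.length / 2))
        (by rw [List.length_drop]; omega) hYne
      rw [pvDcN_step f P (by omega)]
      simp only [hX, hY]
      conv_rhs => rw [(List.take_append_drop (P.length / 2) P).symm]
      rw [pvSumS_append, pvSumG_append, pvC_append]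
      rw [show (0 : Int) + pvSumS (P.take (P.length / 2))
            = pvSumS (P.take (P.length / 2)) + 0 from by omega,
          pvC_shift]
      rw [pvMax_append _ _ (by simpa using pvC_ne_nil _ _ hXne)
            (by simpa using pvC_ne_nil _ _ hYne),
          pvMax_map_add _ _ (pvC_ne_nil _ _ hXne),
          pvMax_map_add _ _ (pvC_ne_nil _ _ hYne)]
      simp only [Prod.mk.injEq, true_and]
      omega

theorem pvDc_correct (P : List (Int × Int)) (h : P ≠ []) :
    pvDc P = (pvSumS P, pvSumG P, pvMax (pvC P 0)) :=
  pvDcN_correct P.length P le_rfl h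

-- index-based candidates (A's side), and the bridge to pair lists
def pvGsum (G : List Int) (l : List Int) : Int :=
  (l.map (fun i => PySem.List.pyGetD G i 0)).sum

def pvCands (S G : List Int) (l : List Int) (s : Int) : List Int :=
  match l with
  | [] => []
  | i :: t =>
      (s + PySem.List.pyGetD S i 0 + pvGsum G (i :: t)) ::
        pvCands S G t (s + PySem.List.pyGetD S i 0)

theorem pvGsum_eq (S G : List Int) (l : List Int) :
    pvGsum G l = pvSumG (l.map (fun i => (PySem.List.pyGetD S i 0, PySem.List.pyGetD G i 0))) := by
  induction l with
  | nil => simp [pvGsum, pvSumG]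
  | cons i t ih => simp only [pvGsum, pvSumG, List.map_cons, List.sum_cons] at *; omega

theorem pvCands_eq_pvC (S G : List Int) (l : List Int) (s : Int) :
    pvCands S G l s = pvC (l.map (fun i => (PySem.List.pyGetD S i 0, PySem.List.pyGetD G i 0))) s := by
  induction l generalizing s with
  | nil => simp [pvCands, pvC]
  | cons i t ih =>
    simp only [pvCands, List.map_cons, pvC, ih, List.cons.injEq, and_true]
    rw [pvGsum_eq S G (i :: t)]
    simp

theorem pv_loopA_eq (S G : List Int) (l : List Int) (s t : Int) :
    (l.foldl (fun (st : Int × Int) j =>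
        (st.1 + PySem.List.pyGetD S j 0,
         max st.2 (st.1 + PySem.List.pyGetD S j 0) + PySem.List.pyGetD G j 0)) (s, t)).2
    = (pvCands S G l s).foldl max (t + pvGsum G l) := by
  induction l generalizing s t with
  | nil => simp [pvCands, pvGsum]
  | cons i l ih =>
    simp only [List.foldl_cons, pvCands, ih]
    congr 1
    simp only [pvGsum, List.map_cons, List.sum_cons]
    omega

-- A's indexed second loop over range(len L) is the fold over L itself.
theorem pv_index_loopA (S G L : List Int) :
    (PySem.List.pyRange 0 (L.length : Int) 1).foldl
      (fun (st : Int × Int) i =>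
        (st.1 + PySem.List.pyGetD S (PySem.List.pyGetD L i 0) 0,
         max st.2 (st.1 + PySem.List.pyGetD S (PySem.List.pyGetD L i 0) 0)
           + PySem.List.pyGetD G (PySem.List.pyGetD L i 0) 0)) (0, 0)
    = L.foldl (fun (st : Int × Int) j =>
        (st.1 + PySem.List.pyGetD S j 0,
         max st.2 (st.1 + PySem.List.pyGetD S j 0) + PySem.List.pyGetD G j 0)) (0, 0) := by
  have h := PySem.List.foldl_pyRange_pyGetD (xs := L) (a := 0) (d := (0 : Int))
      (f := fun (st : Int × Int) j =>
        (st.1 + PySem.List.pyGetD S j 0,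
         max st.2 (st.1 + PySem.List.pyGetD S j 0) + PySem.List.pyGetD G j 0))
      (init := ((0 : Int), (0 : Int))) (by norm_num)
  simpa using h

-- the pair list both characterisations share
def pvP (S G : List Int) (n : Int) : List (Int × Int) :=
  (pvL S G n).map (fun i => (PySem.List.pyGetD S i 0, PySem.List.pyGetD G i 0))

theorem pv_A_char (S G : List Int) (n : Int) :
    solve S G n = (pvC (pvP S G n) 0).foldl max (pvSumG (pvP S G n)) := by
  have hA : solve S G n
      = ((PySem.List.pyRange 0 n 1).foldl
          (fun (st : Int × Int) i =>
            (st.1 + PySem.List.pyGetD S (PySem.List.pyGetD (pvL S G n) i 0) 0,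
             max st.2 (st.1 + PySem.List.pyGetD S (PySem.List.pyGetD (pvL S G n) i 0) 0)
               + PySem.List.pyGetD G (PySem.List.pyGetD (pvL S G n) i 0) 0)) (0, 0)).2 := by
    simp only [solve, pv_partition_SG, List.nil_append, ← pvL_def]
  rcases (by omega : n ≤ 0 ∨ 0 < n) with hn | hn
  · have hr : PySem.List.pyRange 0 n 1 = [] := PySem.List.pyRange_one_eq_nil (by omega)
    have hL : pvL S G n = [] := by
      rw [pvL_def, hr]
      simp [(PySem.List.sorted_eq_nil_iff _ _ _).mpr rfl]
    rw [hA, hr]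
    simp [pvP, hL, pvC, pvSumG]
  · have hlen : ((pvL S G n).length : Int) = n := by
      have h1 : (pvL S G n).length = ((n : Int) - 0).toNat := by
        rw [pvL_def, List.length_append, PySem.List.length_sorted, PySem.List.length_sorted,
          pv_len, PySem.List.length_pyRange_one]
      rw [h1]; omega
    rw [hA, show PySem.List.pyRange 0 n 1
        = PySem.List.pyRange 0 (((pvL S G n).length : Int)) 1 from by rw [hlen],
      pv_index_loopA, pv_loopA_eq]
    rw [pvCands_eq_pvC, pvGsum_eq S G]
    simp [pvP]

theorem pv_B_char (S G : List Int) (n : Int) :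
    solve_alt S G n = (pvC (pvP S G n) 0).foldl max (pvSumG (pvP S G n)) := by
  have hP : ((pvL S G n).map
      (fun i => (PySem.List.pyGetD S i 0, PySem.List.pyGetD G i 0))) = pvP S G n := rfl
  show (if pvP S G n = [] then 0
      else max (pvDc (pvP S G n)).2.1 (pvDc (pvP S G n)).2.2)
    = (pvC (pvP S G n) 0).foldl max (pvSumG (pvP S G n))
  by_cases h : pvP S G n = []
  · rw [if_pos h, h]; simp [pvC, pvSumG]
  · rw [if_neg h, pvDc_correct _ h,
      pv_foldl_max _ _ (pvC_ne_nil _ _ h)]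

-- ===== VERDICT (by name: the statement is the Claim_ definition above) =====
theorem solve_spec : Claim_equal_solve := by
  intro S G n _ _
  unfold Spec_solve
  rw [pv_A_char, pv_B_char]
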